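-- pv_equiv track=rewrite | github.com/Sarthak196/LeetCode | PythonProject/Recursion/Elemination_game.py | eliminate_game
-- ===== SOURCE A (Python) =====
-- def eliminate_game(n):
--     # l = [i for i in range(1, n + 1)]
--     # step = 0
--     # def remove_element(l, step):
--     #     if len(l) == 1:
--     #         return l[0]
--     #     elif step % 2 == 0:
--     #         l = remove_first_from_left(l)
--     #     else:
--     #         l = remove_first_from_right(l)
--     #     return remove_element(l, step + 1)
--     #
--     # def remove_first_from_left(l):
--     #     return l[1::2]
--     #
--     # def remove_first_from_right(l):
--     #     l.reverse()
--     #     l = l[1::2]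
--     #     return list(reversed(l))
--     #
--     # return remove_element(l, step)
--     remaining = n
--     step = 1
--     head = 1
--     left_to_right = True
--
--     while remaining > 1:
--         # If we're moving from left or it's an odd count, update the head
--         if left_to_right or remaining % 2 == 1:
--             head += step
--         # Reduce the number of elements remaining
--         remaining //= 2
--         # Double the step size (distance between remaining numbers)
--         step *= 2
--         # Alternate the direction
--         left_to_right = not left_to_right
--
--     return head
-- ===== SOURCE B (Python) =====
-- def eliminate_game(n):
--     # Recursive survivor recurrence: survivor of left-to-right pass on n
--     # numbers is the mirrored survivor of the halved problem.
--     if n <= 1: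
--         return 1
--     return 2 * (n // 2 + 1 - eliminate_game(n // 2))
-- ===== Notes on version B (the rewrite author's own statement) =====
-- stated objective: simpler
-- what changed: Replaced the state-threading loop over head/step/direction/remaining with the textbook two-line survivor recurrence that recurses on the halved problem and reflects positions.
import Mathlib
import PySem

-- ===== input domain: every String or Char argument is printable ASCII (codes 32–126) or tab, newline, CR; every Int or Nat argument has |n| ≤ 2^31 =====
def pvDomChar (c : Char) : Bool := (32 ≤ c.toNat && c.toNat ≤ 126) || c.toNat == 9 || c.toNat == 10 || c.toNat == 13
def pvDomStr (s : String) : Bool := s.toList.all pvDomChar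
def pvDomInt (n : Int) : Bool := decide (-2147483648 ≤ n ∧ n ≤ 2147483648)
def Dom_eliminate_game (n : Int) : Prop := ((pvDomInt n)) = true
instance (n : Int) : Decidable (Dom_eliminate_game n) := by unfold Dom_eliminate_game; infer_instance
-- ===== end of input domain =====

-- B replaces A's state-threading loop (head/step/direction/remaining) with the textbook survivor recurrence on the halved problem; objective: simpler.



-- ===== PORT A =====
-- A's while-loop over the state (remaining, step, head, left_to_right)
def egLoop (remaining step head : Int) (ltr : Bool) : Int :=
  if h : remaining > 1 then
    let head' : Int := if ltr || PySem.Int.mod remaining 2 == 1 then head + step else head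
    egLoop (PySem.Int.floordiv remaining 2) (step * 2) head' (!ltr)
  else head
termination_by remaining.toNat
decreasing_by
  rw [PySem.Int.floordiv_eq_ediv_of_pos (by omega)]
  omega

def eliminate_game (n : Int) : Int := egLoop n 1 1 true

-- ===== PORT B =====
def eliminate_game_alt (n : Int) : Int :=
  if h : n ≤ 1 then 1
  else 2 * (PySem.Int.floordiv n 2 + 1 - eliminate_game_alt (PySem.Int.floordiv n 2))
termination_by n.toNat
decreasing_by
  rw [PySem.Int.floordiv_eq_ediv_of_pos (by omega)]
  omega

-- ===== PRECONDITION & SPEC =====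
def Spec_eliminate_game (n : Int) (out : Int) : Prop := out = eliminate_game_alt n
instance (n : Int) (out : Int) : Decidable (Spec_eliminate_game n out) := by unfold Spec_eliminate_game; infer_instance

-- ===== CLAIM (what is proved, stated in full; the proofs are below) =====
def Claim_equal_eliminate_game : Prop := ∀ (n : Int), Dom_eliminate_game n → Spec_eliminate_game n (eliminate_game n)

-- ===== LEMMAS AND PROOFS =====

lemma alt_base {n : Int} (h : n ≤ 1) : eliminate_game_alt n = 1 := by
  rw [eliminate_game_alt]; simp [h]

lemma alt_step {n : Int} (h : ¬ n ≤ 1) :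
    eliminate_game_alt n
      = 2 * (PySem.Int.floordiv n 2 + 1 - eliminate_game_alt (PySem.Int.floordiv n 2)) := by
  rw [eliminate_game_alt]; simp [h]

-- loop characterisation: starting left-to-right the loop computes head + step*(f r - 1),
-- starting right-to-left it computes head + step*(r - f r), where f = eliminate_game_alt
lemma egLoop_char : ∀ (k : Nat) (r s hd : Int), r.toNat = k → 1 ≤ r →
    egLoop r s hd true = hd + s * (eliminate_game_alt r - 1) ∧
    egLoop r s hd false = hd + s * (r - eliminate_game_alt r) := by
  intro k
  induction k using Nat.strong_induction_on with
  | _ k ih =>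
    intro r s hd hk hr
    by_cases h1 : r > 1
    · have hd2 : PySem.Int.floordiv r 2 = r / 2 :=
        PySem.Int.floordiv_eq_ediv_of_pos (by omega)
      have hm2 : PySem.Int.mod r 2 = r % 2 :=
        PySem.Int.mod_eq_emod_of_pos (by omega)
      have hr2 : 1 ≤ r / 2 := by omega
      have hlt : (r / 2).toNat < k := by omega
      obtain ⟨iht, ihf⟩ := ih (r / 2).toNat hlt (r / 2) (s * 2) (hd + s) rfl hr2
      obtain ⟨iht', ihf'⟩ := ih (r / 2).toNat hlt (r / 2) (s * 2) hd rfl hr2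
      have hstep := alt_step (n := r) (by omega)
      rw [hd2] at hstep
      constructor
      · rw [egLoop]
        simp only [h1, dif_pos, hd2, Bool.not_true]
        rw [show (if (true : Bool) || PySem.Int.mod r 2 == 1 then hd + s else hd) = hd + s by simp]
        rw [ihf, hstep]; ring
      · rw [egLoop]
        simp only [h1, dif_pos, hd2, hm2, Bool.false_or, Bool.not_false]
        by_cases hodd : r % 2 = 1
        · rw [if_pos (by simp [hodd]), iht, hstep]
          have : 2 * (r / 2) + 1 = r := by omega
          linear_combination s * this
        · have heven : r % 2 = 0 := by omega
          rw [if_neg (by simp [heven]), iht', hstep]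
          have : 2 * (r / 2) = r := by omega
          linear_combination s * this
    · -- r = 1
      have hr1 : r = 1 := by omega
      subst hr1
      constructor <;>
        · rw [egLoop]; simp [alt_base (by norm_num : (1:Int) ≤ 1)]

-- ===== VERDICT (by name: the statement is the Claim_ definition above) =====
theorem eliminate_game_spec : Claim_equal_eliminate_game := by
  intro n _
  unfold Spec_eliminate_game eliminate_game
  by_cases h : 1 ≤ n
  · have := (egLoop_char n.toNat n 1 1 rfl h).1
    rw [this]; ring
  · rw [egLoop, alt_base (by omega)]
    simp [show ¬ n > 1 by omega]
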